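-- pv_equiv track=rewrite | github.com/djLeeeee/BOJAutoPush | 백준/Gold/5425.자리합/자리합.py | sum_digit
-- ===== SOURCE A (Python) =====
-- my_sum = [0, 1, 3, 6, 10, 15, 21, 28, 36, 45, 0]
--
-- def sum_digit(num):
--     if num < 10:
--         return my_sum[num]
--     ans = 0
--     front = sum([int(i) for i in str(num)])
--     remain = num % 10
--     num //= 10
--     front -= remain
--     return num * 45 + 10 * sum_digit(num) + my_sum[remain] - front * (9 - remain)
-- ===== SOURCE B (Python) =====
-- my_sum = [0, 1, 3, 6, 10, 15, 21, 28, 36, 45, 0]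
--
-- def sum_digit(num):
--     if num < 10:
--         return my_sum[num]
--     ans = 0
--     prefix = 0
--     digits = [int(c) for c in str(num)]
--     k = len(digits)
--     for i, g in enumerate(digits):
--         p = 10 ** (k - 1 - i)
--         suffix = num % p
--         ans += prefix * 45 * p + g * (g - 1) // 2 * p + g * (suffix + 1)
--         prefix = prefix * 10 + g
--     return ans
-- ===== Notes on version B (the rewrite author's own statement) =====
-- stated objective: alternative
-- what changed: Replaced the tail of A's per-digit recursion (num//10 with a correction term per level) by a single left-to-right positional digit-DP pass over the digit list, maintaining the consumed prefix and adding each position's closed-form contribution.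
import Mathlib
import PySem

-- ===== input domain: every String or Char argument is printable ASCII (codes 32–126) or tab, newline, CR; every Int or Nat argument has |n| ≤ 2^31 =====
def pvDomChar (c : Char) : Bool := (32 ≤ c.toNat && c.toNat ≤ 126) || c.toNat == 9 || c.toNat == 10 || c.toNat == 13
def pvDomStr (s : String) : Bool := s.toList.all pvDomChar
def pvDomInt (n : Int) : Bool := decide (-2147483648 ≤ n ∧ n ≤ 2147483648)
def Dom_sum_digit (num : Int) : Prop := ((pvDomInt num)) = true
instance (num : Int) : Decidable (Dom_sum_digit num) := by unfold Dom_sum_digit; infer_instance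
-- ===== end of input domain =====

-- B replaces A's per-digit recursion by a single left-to-right positional digit-DP pass (alternative decomposition, same cost).

-- ===== PORT A =====
def mySum : List Int := [0, 1, 3, 6, 10, 15, 21, 28, 36, 45, 0]

-- int(c) for a single character c (exact where c is a decimal digit, the only case reached)
def digitVal (c : Char) : Int := (PySem.Int.ofStr? (String.ofList [c])).getD 0

def sum_digit (num : Int) : Int :=
  if h : num < 10 then (PySem.List.pyGet? mySum num).getD 0
  else
    let front := ((PySem.Int.toStr num).toList.map digitVal).sum
    let remain := PySem.Int.mod num 10
    let num' := PySem.Int.floordiv num 10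
    let front' := front - remain
    num' * 45 + 10 * sum_digit num' + (PySem.List.pyGet? mySum remain).getD 0 - front' * (9 - remain)
  termination_by num.toNat
  decreasing_by
    have hfd : PySem.Int.floordiv num 10 = num / 10 :=
      PySem.Int.floordiv_eq_ediv_of_pos (by norm_num)
    simp only [hfd]
    omega

-- ===== PORT B =====
-- loop body of Source B's for-loop: state (ans, prefix), element (i, g) from enumerate(digits)
def pvF (num k : Int) : Int × Int → Int × Int → Int × Int := fun st ig =>
  let p : Int := 10 ^ (k - 1 - ig.1).toNat
  let suffix := PySem.Int.mod num p
  (st.1 + st.2 * 45 * p + PySem.Int.floordiv (ig.2 * (ig.2 - 1)) 2 * p + ig.2 * (suffix + 1),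
   st.2 * 10 + ig.2)

def sum_digit_alt (num : Int) : Int :=
  if num < 10 then (PySem.List.pyGet? mySum num).getD 0
  else
    let digits := (PySem.Int.toStr num).toList.map digitVal
    let k := PySem.List.len digits
    let st := (PySem.List.enumerate digits 0).foldl (pvF num k) (0, 0)
    st.1

-- ===== PRECONDITION & SPEC =====
-- Pre_ excludes exactly num < -11, where my_sum[num] raises IndexError (in A and in B alike).
def Pre_sum_digit (num : Int) : Prop := -11 ≤ num
instance (num : Int) : Decidable (Pre_sum_digit num) := by unfold Pre_sum_digit; infer_instance
def pvWitness_sum_digit : Int := 37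

def Spec_sum_digit (num : Int) (out : Int) : Prop := out = sum_digit_alt num
instance (num : Int) (out : Int) : Decidable (Spec_sum_digit num out) := by unfold Spec_sum_digit; infer_instance

-- ===== CLAIM (what is proved, stated in full; the proofs are below) =====
def Claim_equal_sum_digit : Prop := ∀ (num : Int), Dom_sum_digit num → Pre_sum_digit num → Spec_sum_digit num (sum_digit num)

-- ===== LEMMAS AND PROOFS =====

-- the digit characters of n, most significant first
def pvCharsOf (n : Nat) : List Char :=
  if n < 10 then [Nat.digitChar n] else pvCharsOf (n / 10) ++ [Nat.digitChar (n % 10)]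
  decreasing_by omega

-- the digit values of n, most significant first
def pvDlist (n : Nat) : List Int :=
  if n < 10 then [(n : Int)] else pvDlist (n / 10) ++ [((n % 10 : Nat) : Int)]
  decreasing_by omega

lemma toDigitsCore_eq (f : Nat) : ∀ (n : Nat) (l : List Char), 0 < f → n < 10 ^ f →
    Nat.toDigitsCore 10 f n l = pvCharsOf n ++ l := by
  induction f with
  | zero => intro n l hf h; omega
  | succ f ih =>
    intro n l _ h
    rw [Nat.toDigitsCore]
    by_cases h10 : n < 10
    · have hz : n / 10 = 0 := by omega
      simp only [hz, reduceIte]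
      conv_rhs => rw [pvCharsOf]
      simp [h10, Nat.mod_eq_of_lt h10]
    · have hnz : ¬ n / 10 = 0 := by omega
      have hf' : 0 < f := by
        by_contra hc
        have hf0 : f = 0 := by omega
        subst hf0
        simp at h
        omega
      have hlt : n / 10 < 10 ^ f := by
        rw [Nat.div_lt_iff_lt_mul (by norm_num)]
        calc n < 10 ^ (f + 1) := h
          _ = 10 ^ f * 10 := by ring
      simp only [if_neg hnz]
      rw [ih (n / 10) _ hf' hlt]
      conv_rhs => rw [pvCharsOf]
      simp [h10]

lemma toDigits_eq (n : Nat) : Nat.toDigits 10 n = pvCharsOf n := by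
  have h : n < 10 ^ (n + 1) := by
    calc n < n + 1 := Nat.lt_succ_self n
    _ ≤ 10 ^ (n + 1) := Nat.le_of_lt (Nat.lt_pow_self (by norm_num))
  simpa using toDigitsCore_eq (n + 1) n [] (Nat.succ_pos n) h

lemma digitVal_digitChar (d : Nat) (h : d < 10) : digitVal (Nat.digitChar d) = (d : Int) := by
  interval_cases d <;> decide

lemma map_digitVal_pvCharsOf (n : Nat) : (pvCharsOf n).map digitVal = pvDlist n := by
  by_cases h : n < 10
  · rw [pvCharsOf, pvDlist]
    simp [h, digitVal_digitChar n h]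
  · rw [pvCharsOf, pvDlist]
    simp only [h, ite_false, List.map_append, List.map_cons, List.map_nil]
    rw [map_digitVal_pvCharsOf (n / 10), digitVal_digitChar (n % 10) (by omega)]
  decreasing_by omega

lemma digits_eq_pvDlist (num : Int) (h : 0 ≤ num) :
    (PySem.Int.toStr num).toList.map digitVal = pvDlist num.toNat := by
  rw [PySem.Int.toList_toStr]
  unfold PySem.Int.toChars
  rw [if_neg (by omega), toDigits_eq, map_digitVal_pvCharsOf]

lemma pvDlist_foldl (n : Nat) : (pvDlist n).foldl (fun a g => a * 10 + g) 0 = (n : Int) := by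
  by_cases h : n < 10
  · rw [pvDlist]; simp [h]
  · rw [pvDlist]
    simp only [h, ite_false, List.foldl_append, List.foldl_cons, List.foldl_nil]
    rw [pvDlist_foldl (n / 10)]
    push_cast
    omega
  decreasing_by omega

lemma snd_foldl_pvF (num k : Int) : ∀ (l : List (Int × Int)) (a p : Int),
    (l.foldl (pvF num k) (a, p)).2 = l.foldl (fun acc x => acc * 10 + x.2) p := by
  intro l
  induction l with
  | nil => intro a p; rfl
  | cons hd tl ih => intro a p; simp only [List.foldl_cons, pvF]; exact ih _ _

lemma suffix_shift (q r m : Int) (hm : 0 < m) (hr0 : 0 ≤ r) (hr : r < 10) :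
    PySem.Int.mod (10 * q + r) (10 * m) = 10 * PySem.Int.mod q m + r := by
  rw [PySem.Int.mod_eq_emod_of_pos (by omega), PySem.Int.mod_eq_emod_of_pos hm]
  have hqm : m * (q / m) + q % m = q := Int.mul_ediv_add_emod q m
  have hu0 : 0 ≤ q % m := Int.emod_nonneg q (by omega)
  have hum : q % m < m := Int.emod_lt_of_pos q hm
  have hrw : 10 * q + r = (10 * (q % m) + r) + (10 * m) * (q / m) := by
    nlinarith [hqm]
  rw [hrw, Int.add_mul_emod_self_left]
  exact Int.emod_eq_of_lt (by omega) (by omega)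

lemma fold_shift (q r k : Int) (hr0 : 0 ≤ r) (hr : r < 10) :
    ∀ (l : List (Int × Int)), (∀ x ∈ l, 0 ≤ x.1 ∧ x.1 ≤ k - 2) →
    ∀ (a a' p : Int),
      l.foldl (pvF (10 * q + r) k) (a, p) =
        (a + 10 * ((l.foldl (pvF q (k - 1)) (a', p)).1 - a') + (l.map (·.2)).sum * (r - 9),
         (l.foldl (pvF q (k - 1)) (a', p)).2) := by
  intro l
  induction l with
  | nil => intro _ a a' p; simp
  | cons hd tl ih =>
    intro hmem a a' p
    obtain ⟨hi0, hik⟩ := hmem hd (List.mem_cons_self)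
    have hmem' : ∀ x ∈ tl, 0 ≤ x.1 ∧ x.1 ≤ k - 2 :=
      fun x hx => hmem x (List.mem_cons_of_mem _ hx)
    have hexp : (k - 1 - hd.1).toNat = (k - 2 - hd.1).toNat + 1 := by omega
    have hP' : (0 : Int) < 10 ^ (k - 2 - hd.1).toNat := by positivity
    have hpow : (10 : Int) ^ (k - 1 - hd.1).toNat = 10 * 10 ^ (k - 2 - hd.1).toNat := by
      rw [hexp, pow_succ]; ring
    have hsuf : PySem.Int.mod (10 * q + r) ((10 : Int) ^ (k - 1 - hd.1).toNat)
        = 10 * PySem.Int.mod q ((10 : Int) ^ (k - 2 - hd.1).toNat) + r := by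
      rw [hpow]; exact suffix_shift q r _ hP' hr0 hr
    have hexp' : k - 1 - 1 - hd.1 = k - 2 - hd.1 := by ring
    have hsnd : (pvF (10 * q + r) k (a, p) hd).2 = (pvF q (k - 1) (a', p) hd).2 := rfl
    have hfst : (pvF (10 * q + r) k (a, p) hd).1 =
        a + 10 * ((pvF q (k - 1) (a', p) hd).1 - a') + hd.2 * (r - 9) := by
      simp only [pvF]
      rw [hexp', hsuf, hpow]
      ring
    simp only [List.foldl_cons, List.map_cons, List.sum_cons]
    rw [← Prod.mk.eta (p := pvF (10 * q + r) k (a, p) hd),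
        ← Prod.mk.eta (p := pvF q (k - 1) (a', p) hd), hsnd,
        ih hmem' ((pvF (10 * q + r) k (a, p) hd).1) ((pvF q (k - 1) (a', p) hd).1)
          ((pvF q (k - 1) (a', p) hd).2)]
    refine Prod.ext ?_ rfl
    simp only
    rw [hfst]
    ring

lemma mySumGet_eq (r : Int) (h0 : 0 ≤ r) (h9 : r < 10) :
    (PySem.List.pyGet? mySum r).getD 0 = PySem.Int.floordiv (r * (r - 1)) 2 + r := by
  interval_cases r <;> decide

lemma A_step (num : Int) (h : ¬ num < 10) :
    sum_digit num = PySem.Int.floordiv num 10 * 45 + 10 * sum_digit (PySem.Int.floordiv num 10)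
      + (PySem.List.pyGet? mySum (PySem.Int.mod num 10)).getD 0
      - (((PySem.Int.toStr num).toList.map digitVal).sum - PySem.Int.mod num 10)
          * (9 - PySem.Int.mod num 10) := by
  rw [sum_digit]
  rw [dif_neg h]

lemma B_step (num : Int) (h : ¬ num < 10) :
    sum_digit_alt num = ((PySem.List.enumerate ((PySem.Int.toStr num).toList.map digitVal) 0).foldl
      (pvF num (PySem.List.len ((PySem.Int.toStr num).toList.map digitVal))) (0, 0)).1 := by
  rw [sum_digit_alt]
  rw [if_neg h]

lemma pvDlist_lt10 (n : Nat) (h : n < 10) : pvDlist n = [(n : Int)] := by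
  rw [pvDlist]; simp [h]

lemma alt_base (q : Int) (h1 : 1 ≤ q) (h9 : q < 10) :
    ((PySem.List.enumerate (pvDlist q.toNat) 0).foldl (pvF q ((pvDlist q.toNat).length : Int)) (0, 0)).1
      = sum_digit_alt q := by
  rw [sum_digit_alt, if_pos h9, pvDlist_lt10 q.toNat (by omega)]
  have hq : ((q.toNat : Int)) = q := by omega
  rw [hq]
  simp only [PySem.List.enumerate_cons, PySem.List.enumerate_nil, List.foldl_cons, List.foldl_nil,
    List.length_cons, List.length_nil, pvF]
  interval_cases q <;> decide

lemma main_eq : ∀ (n : Nat) (num : Int), num.toNat = n → sum_digit num = sum_digit_alt num := by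
  intro n
  induction n using Nat.strong_induction_on with
  | _ n ih =>
    intro num hn
    by_cases h : num < 10
    · rw [sum_digit, sum_digit_alt, dif_pos h, if_pos h]
    · have h10 : (10 : Int) ≤ num := not_lt.mp h
      have hq : PySem.Int.floordiv num 10 = num / 10 :=
        PySem.Int.floordiv_eq_ediv_of_pos (by norm_num)
      have hr : PySem.Int.mod num 10 = num % 10 :=
        PySem.Int.mod_eq_emod_of_pos (by norm_num)
      have IH : sum_digit (PySem.Int.floordiv num 10) = sum_digit_alt (PySem.Int.floordiv num 10) := by
        refine ih (PySem.Int.floordiv num 10).toNat (by rw [hq]; omega) _ rfl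
      have hdig : (PySem.Int.toStr num).toList.map digitVal = pvDlist num.toNat :=
        digits_eq_pvDlist num (by omega)
      have hsplit : pvDlist num.toNat
          = pvDlist (PySem.Int.floordiv num 10).toNat ++ [PySem.Int.mod num 10] := by
        rw [pvDlist, if_neg (show ¬ num.toNat < 10 by omega)]
        congr 2
        · rw [hq]; omega
        · rw [hr]; omega
      -- abbreviations
      set q : Int := PySem.Int.floordiv num 10 with hqd
      set r : Int := PySem.Int.mod num 10 with hrd
      set L : List Int := pvDlist q.toNat with hLd
      have hr0 : 0 ≤ r := by rw [hr]; omega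
      have hr9 : r < 10 := by rw [hr]; omega
      have hq1 : 1 ≤ q := by rw [hq]; omega
      have hqr : 10 * q + r = num := by rw [hq, hr]; omega
      -- B side evaluation
      rw [A_step num h, B_step num h, hdig, hsplit]
      have hk : PySem.List.len (L ++ [r]) = (L.length : Int) + 1 := by
        simp [PySem.List.len_eq]
      rw [hk]
      have henum : PySem.List.enumerate (L ++ [r]) 0
          = PySem.List.enumerate L 0 ++ [((L.length : Int), r)] := by
        rw [PySem.List.enumerate_append]
        simp [PySem.List.enumerate_cons, PySem.List.enumerate_nil]
      rw [henum, List.foldl_append]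
      have hbound : ∀ x ∈ PySem.List.enumerate L 0, 0 ≤ x.1 ∧ x.1 ≤ ((L.length : Int) + 1) - 2 := by
        intro x hx
        rw [PySem.List.mem_enumerate_iff] at hx
        obtain ⟨j, hj, hxe⟩ := hx
        subst hxe
        simp only [zero_add]
        omega
      have hshift := fold_shift q r ((L.length : Int) + 1) hr0 hr9 (PySem.List.enumerate L 0) hbound 0 0 0
      rw [hqr] at hshift
      rw [hshift]
      -- identify the components of the inner fold
      have hsum : ((PySem.List.enumerate L 0).map (·.2)).sum = L.sum := by
        rw [PySem.List.map_snd_enumerate]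
      have hsnd : ((PySem.List.enumerate L 0).foldl (pvF q (((L.length : Int) + 1) - 1)) ((0 : Int), (0 : Int))).2 = q := by
        rw [snd_foldl_pvF]
        have : (PySem.List.enumerate L 0).foldl (fun acc x => acc * 10 + x.2) 0
            = ((PySem.List.enumerate L 0).map (·.2)).foldl (fun a g => a * 10 + g) 0 := by
          rw [List.foldl_map]
        rw [this, PySem.List.map_snd_enumerate, hLd, pvDlist_foldl]
        omega
      have hk1 : ((L.length : Int) + 1) - 1 = (L.length : Int) := by ring
      have hAQ : ((PySem.List.enumerate L 0).foldl (pvF q (((L.length : Int) + 1) - 1)) ((0 : Int), (0 : Int))).1 = sum_digit_alt q := by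
        rw [hk1]
        by_cases hq9 : q < 10
        · exact alt_base q hq1 hq9
        · rw [B_step q hq9, digits_eq_pvDlist q (by omega), ← hLd]
          rfl
      -- the final loop iteration
      have hexp0 : (((L.length : Int) + 1) - 1 - (L.length : Int)).toNat = 0 := by omega
      have hmod1 : PySem.Int.mod num 1 = 0 := by
        rw [PySem.Int.mod_eq_emod_of_pos (by norm_num), Int.emod_one]
      have hsumfront : (L ++ [r]).sum = L.sum + r := by simp
      rw [hsumfront, ← hqd, ← hrd]
      simp only [List.foldl_cons, List.foldl_nil, pvF, hexp0, pow_zero, hmod1]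
      rw [hsum, hsnd, hAQ, mySumGet_eq r hr0 hr9, IH]
      ring

-- ===== VERDICT (by name: the statement is the Claim_ definition above) =====
theorem sum_digit_spec : Claim_equal_sum_digit := by
  intro num _ _
  unfold Spec_sum_digit
  exact main_eq num.toNat num rfl
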